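-- pv_equiv track=rewrite | github.com/usmanmyria/Protein-Science-AI | protein_science/foundation/function_predictor.py | _predict_transmembrane
-- ===== SOURCE A (Python) =====
-- from typing import Dict, List, Optional, Tuple, Union, Set
--
-- def _predict_transmembrane(sequence: str) -> List[Tuple[int, int]]:
--     """Simple transmembrane region prediction."""
--     transmembrane_regions = []
--
--     # Simple sliding window approach
--     window_size = 20
--     hydrophobic_aas = set("AILMFPWYV")
--
--     for i in range(len(sequence) - window_size + 1):
--         window = sequence[i:i + window_size]
--         hydrophobic_count = sum(1 for aa in window if aa in hydrophobic_aas)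
--
--         if hydrophobic_count / window_size > 0.7:
--             transmembrane_regions.append((i, i + window_size))
--
--     return transmembrane_regions
-- ===== SOURCE B (Python) =====
-- def _predict_transmembrane(sequence):
--     """Simple transmembrane region prediction (O(n) running-count sliding window)."""
--     window_size = 20
--     hydrophobic_aas = set("AILMFPWYV")
--     flags = [1 if aa in hydrophobic_aas else 0 for aa in sequence]
--     n = len(flags)
--     if n < window_size:
--         return []
--     regions = []
--     # count / 20 > 0.7 for an integer count is exactly count > 14
--     count = sum(flags[:window_size])
--     for i in range(n - window_size + 1):
--         if count > 14:
--             regions.append((i, i + window_size))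
--         if i + window_size < n:
--             count += flags[i + window_size] - flags[i]
--     return regions
-- ===== Notes on version B (the rewrite author's own statement) =====
-- stated objective: faster
-- what changed: A recounts the hydrophobic residues of every 20-wide window from scratch; B precomputes 0/1 flags and keeps one running count, adding the entering residue and subtracting the leaving one, and tests count > 14 (the exact integer form of count/20 > 0.7).
import Mathlib
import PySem

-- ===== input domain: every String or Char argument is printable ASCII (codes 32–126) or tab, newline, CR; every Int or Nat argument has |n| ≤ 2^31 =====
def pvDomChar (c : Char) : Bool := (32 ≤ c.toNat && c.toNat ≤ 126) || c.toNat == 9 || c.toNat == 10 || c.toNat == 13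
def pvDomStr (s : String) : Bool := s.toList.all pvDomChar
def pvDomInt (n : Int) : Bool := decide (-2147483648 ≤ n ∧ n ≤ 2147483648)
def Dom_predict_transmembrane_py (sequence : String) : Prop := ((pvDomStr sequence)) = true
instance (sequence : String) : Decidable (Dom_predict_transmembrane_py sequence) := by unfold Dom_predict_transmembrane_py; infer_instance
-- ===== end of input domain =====

-- B replaces A's per-window recount by a single running hydrophobic count updated when the window slides.

-- ===== PORT A =====
-- set("AILMFPWYV")
def pvHydro : PySem.Set Char := PySem.Set.ofList "AILMFPWYV".toList

-- loop body of A: window = sequence[i:i+20]; count hydrophobics; append if count/20 > 0.7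
-- (Python's float test count/20 > 0.7 is, for integer 0 ≤ count ≤ 20, exactly count * 10 > 7 * 20:
--  14/20 rounds to the same double as 0.7, every other count/20 compares as the rationals do)
def pvStepA (s : List Char) (acc : List (Int × Int)) (i : Int) : List (Int × Int) :=
  let window := PySem.List.slice s (some i) (some (i + 20))
  let hydrophobic_count : Int :=
    window.foldl (fun c aa => c + (if aa ∈ pvHydro then 1 else 0)) 0
  if hydrophobic_count * 10 > 7 * 20 then acc ++ [(i, i + 20)] else acc

def predict_transmembrane_py (sequence : String) : List (Int × Int) :=
  let s := sequence.toList
  let window_size : Int := 20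
  (PySem.List.pyRange 0 ((s.length : Int) - window_size + 1) 1).foldl (pvStepA s) []

-- ===== PORT B =====
-- loop body of B: emit the window if the running count > 14, then slide the count by one position
-- (flags[i] and flags[i+20] are read only under the guard i+20 < n, so both indices are in range
--  and pyGetD's default is never used — exactly Source B's in-range list indexing)
def pvStepB (flags : List Int) (n : Int) (st : Int × List (Int × Int)) (i : Int) :
    Int × List (Int × Int) :=
  let regions := if st.1 > 14 then st.2 ++ [(i, i + 20)] else st.2
  let count := if i + 20 < n then
      st.1 + (PySem.List.pyGetD flags (i + 20) 0 - PySem.List.pyGetD flags i 0)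
    else st.1
  (count, regions)

def predict_transmembrane_py_alt (sequence : String) : List (Int × Int) :=
  let window_size : Int := 20
  let flags : List Int := sequence.toList.map (fun aa => if aa ∈ pvHydro then 1 else 0)
  let n : Int := (flags.length : Int)
  if n < window_size then []
  else
    ((PySem.List.pyRange 0 (n - window_size + 1) 1).foldl (pvStepB flags n)
      ((PySem.List.slice flags (some 0) (some window_size)).sum, [])).2

-- ===== PRECONDITION & SPEC =====
def Spec_predict_transmembrane_py (sequence : String) (out : List (Int × Int)) : Prop := out = predict_transmembrane_py_alt sequence
instance (sequence : String) (out : List (Int × Int)) : Decidable (Spec_predict_transmembrane_py sequence out) := by unfold Spec_predict_transmembrane_py; infer_instance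

-- ===== CLAIM (what is proved, stated in full; the proofs are below) =====
def Claim_equal_predict_transmembrane_py : Prop := ∀ (sequence : String), Dom_predict_transmembrane_py sequence → Spec_predict_transmembrane_py sequence (predict_transmembrane_py sequence)

-- ===== LEMMAS AND PROOFS =====

-- sum of the 0/1 hydrophobicity flags of the window starting at position k
def pvS (flags : List Int) (k : Nat) : Int := ((flags.drop k).take 20).sum

-- A's step at a nonnegative index is exactly the window-flag-sum test
theorem pvStepA_eq (s : List Char) (acc : List (Int × Int)) (k : Nat) :
    pvStepA s acc (k : Int) =
      if pvS (s.map (fun aa => if aa ∈ pvHydro then 1 else 0)) k > 14 then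
        acc ++ [((k : Int), (k : Int) + 20)] else acc := by
  simp only [pvStepA, pvS]
  rw [PySem.List.slice_toNat s (a := (k:Int)) (b := (k:Int)+20) (by positivity) (by positivity)]
  rw [PySem.List.foldl_add]
  have h1 : ((k : Int) + 20).toNat = k + 20 := by omega
  have h2 : ((k : Int)).toNat = k := by omega
  rw [h1, h2]
  have h3 : k + 20 - k = 20 := by omega
  rw [h3, List.map_take, List.map_drop]
  split_ifs with c1 c2 <;> first | rfl | omega

-- sliding the window one step to the right: add the entering flag, drop the leaving one
theorem pvS_succ (flags : List Int) (k : Nat) (h : k + 20 < flags.length) :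
    pvS flags (k + 1) = pvS flags k + flags[k + 20] - flags[k] := by
  unfold pvS
  have h1 : k < flags.length := by omega
  have h2 : 19 < (flags.drop (k+1)).length := by simp; omega
  rw [List.drop_eq_getElem_cons h1, List.take_succ_cons]
  conv_lhs => rw [show (20:Nat) = 19 + 1 from rfl, List.take_add_one, List.getElem?_eq_getElem h2]
  simp [List.getElem_drop]
  ring_nf

-- the two loops agree as long as B's running count equals the current window sum
theorem pvLoops_eq (s : List Char) (flags : List Int)
    (hf : flags = s.map (fun aa => if aa ∈ pvHydro then 1 else 0))
    (hn : 20 ≤ flags.length) :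
    ∀ (d k : Nat) (count : Int) (acc : List (Int × Int)),
      flags.length - 19 ≤ k + d →
      (k < flags.length - 19 → count = pvS flags k) →
      ((PySem.List.pyRange (k : Int) ((flags.length : Int) - 20 + 1) 1).foldl
          (pvStepB flags (flags.length : Int)) (count, acc)).2 =
        (PySem.List.pyRange (k : Int) ((flags.length : Int) - 20 + 1) 1).foldl (pvStepA s) acc := by
  intro d
  induction d with
  | zero =>
    intro k count acc hkd hinv
    rw [PySem.List.pyRange_one_eq_nil (by omega)]
    simp
  | succ d ih =>
    intro k count acc hkd hinv
    by_cases hk : k < flags.length - 19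
    · have hcount := hinv hk
      rw [PySem.List.pyRange_one_cons (by omega)]
      simp only [List.foldl_cons]
      have hstep : pvStepA s acc (k : Int) =
          if pvS flags k > 14 then acc ++ [((k : Int), (k : Int) + 20)] else acc := by
        rw [pvStepA_eq, ← hf]
      have hB : pvStepB flags (flags.length : Int) (count, acc) (k : Int) =
          ((if (k : Int) + 20 < (flags.length : Int) then
              count + (PySem.List.pyGetD flags ((k : Int) + 20) 0 - PySem.List.pyGetD flags (k : Int) 0)
            else count),
           if count > 14 then acc ++ [((k : Int), (k : Int) + 20)] else acc) := rfl
      rw [hB, hstep, hcount]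
      have hcast : ((k : Int) + 1) = ((k + 1 : Nat) : Int) := by push_cast; ring
      rw [hcast]
      apply ih (k + 1) _ _ (by omega)
      intro hk1
      have hrange : k + 20 < flags.length := by omega
      rw [if_pos (by omega : (k : Int) + 20 < (flags.length : Int))]
      rw [PySem.List.pyGetD_eq_getElem flags 0 (by positivity) (by omega),
          PySem.List.pyGetD_eq_getElem flags 0 (by positivity) (by omega)]
      have e1 : ((k : Int) + 20).toNat = k + 20 := by omega
      have e2 : ((k : Int)).toNat = k := by omega
      simp only [e1, e2]
      rw [pvS_succ flags k hrange]
      ring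
    · rw [PySem.List.pyRange_one_eq_nil (by omega)]
      simp

theorem pv_main_eq (sequence : String) :
    predict_transmembrane_py sequence = predict_transmembrane_py_alt sequence := by
  simp only [predict_transmembrane_py, predict_transmembrane_py_alt]
  set s := sequence.toList with hs
  set flags : List Int := s.map (fun aa => if aa ∈ pvHydro then 1 else 0) with hf
  have hlen : flags.length = s.length := by simp [hf]
  by_cases h : (flags.length : Int) < 20
  · rw [if_pos h, PySem.List.pyRange_one_eq_nil (by omega)]
    simp
  · rw [if_neg h]
    have hn : 20 ≤ flags.length := by omega
    have hinit : (PySem.List.slice flags (some 0) (some 20)).sum = pvS flags 0 := by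
      rw [PySem.List.slice_toNat flags (a := 0) (b := 20) le_rfl (by norm_num)]
      simp [pvS]
    rw [hinit, ← hlen]
    have := pvLoops_eq s flags hf hn (flags.length - 19) 0 (pvS flags 0) [] (by omega)
      (fun _ => rfl)
    simpa using this.symm

-- ===== VERDICT (by name: the statement is the Claim_ definition above) =====
theorem predict_transmembrane_py_spec : Claim_equal_predict_transmembrane_py := by
  intro sequence _
  unfold Spec_predict_transmembrane_py
  exact pv_main_eq sequence
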